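-- pv_equiv track=rewrite | github.com/yoshikawa-river/keiba-yy | src/data/importers/odds_parser.py | _validate_combination
-- ===== SOURCE A (Python) =====
-- def _validate_combination(odds_type: str, combination: str) -> bool:
--     """
--     組み合わせフォーマットのバリデーション
--
--     Args:
--         odds_type: オッズ種別
--         combination: 組み合わせ文字列
--
--     Returns:
--         バリデーション成功フラグ
--     """
--     # ハイフン区切りのフォーマットチェック
--     parts = combination.split("-")
--
--     if odds_type == "win":
--         # 単勝: 馬番1つ（例: "3"）
--         return len(parts) == 1 and parts[0].isdigit()
--
--     if odds_type == "place":
--         # 複勝: 馬番1つ（例: "5"）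
--         return len(parts) == 1 and parts[0].isdigit()
--
--     if odds_type in ["exacta", "quinella"]:
--         # 馬連・馬単: 馬番2つ（例: "3-5"）
--         return (
--             len(parts) == 2
--             and all(p.isdigit() for p in parts)
--             and parts[0] != parts[1]
--         )
--
--     if odds_type == "wide":
--         # ワイド: 馬番2つ（例: "3-5"）
--         return (
--             len(parts) == 2
--             and all(p.isdigit() for p in parts)
--             and parts[0] != parts[1]
--         )
--
--     if odds_type == "trio":
--         # 3連複: 馬番3つ（例: "3-5-7"）
--         return (
--             len(parts) == 3
--             and all(p.isdigit() for p in parts)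
--             and len(set(parts)) == 3  # 重複なし
--         )
--
--     if odds_type == "trifecta":
--         # 3連単: 馬番3つ（例: "3-5-7"）
--         return (
--             len(parts) == 3
--             and all(p.isdigit() for p in parts)
--             and len(set(parts)) == 3  # 重複なし
--         )
--
--     return False
-- ===== SOURCE B (Python) =====
-- _NEED = {"win": 1, "place": 1, "exacta": 2, "quinella": 2,
--          "wide": 2, "trio": 3, "trifecta": 3}
--
--
-- def _validate_combination(odds_type: str, combination: str) -> bool:
--     need = _NEED.get(odds_type)
--     if need is None:
--         return False
--     distinct = need > 1
--     seen = []
--     cur = ""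
--     for ch in combination + "-":
--         if ch == "-":
--             if not cur:
--                 return False
--             if distinct and cur in seen:
--                 return False
--             seen.append(cur)
--             cur = ""
--         elif ch.isdigit():
--             cur += ch
--         else:
--             return False
--     return len(seen) == need
-- ===== Notes on version B (the rewrite author's own statement) =====
-- stated objective: alternative
-- what changed: Replaces split-into-parts plus a seven-branch per-type cascade by a single left-to-right character scan (a small state machine over combination + '-') that flushes parts at dashes, rejects non-digit characters immediately, and tracks already-seen parts in an accumulator, with the per-type rules reduced to one table lookup of the required part count.
import Mathlib
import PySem

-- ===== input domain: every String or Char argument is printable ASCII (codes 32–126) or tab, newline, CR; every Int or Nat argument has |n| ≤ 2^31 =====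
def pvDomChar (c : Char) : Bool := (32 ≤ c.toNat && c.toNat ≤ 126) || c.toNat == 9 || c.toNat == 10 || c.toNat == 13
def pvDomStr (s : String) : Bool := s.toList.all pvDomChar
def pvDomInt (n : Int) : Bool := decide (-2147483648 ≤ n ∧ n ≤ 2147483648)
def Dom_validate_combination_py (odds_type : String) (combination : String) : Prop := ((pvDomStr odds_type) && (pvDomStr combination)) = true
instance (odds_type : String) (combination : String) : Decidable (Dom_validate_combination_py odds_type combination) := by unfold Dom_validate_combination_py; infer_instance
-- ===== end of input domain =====

-- B replaces A's split-then-seven-branch validation by a single left-to-right character scan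
-- over combination + "-" driven by a table of required part counts; alternative, not faster.

-- ===== PORT A =====
-- parts[0] / parts[1] are only reached after the length check (Python's short-circuit `and`),
-- so they are ported as a match on the already-length-checked list shape.
def validate_combination_py (odds_type : String) (combination : String) : Bool :=
  let parts := (PySem.Str.split? combination "-").getD []  -- sep "-" ≠ "", so split? is always some
  if odds_type == "win" then
    decide (parts.length = 1) &&
      (match parts with | [p] => PySem.Str.strIsdigit p | _ => false)
  else if odds_type == "place" then
    decide (parts.length = 1) &&
      (match parts with | [p] => PySem.Str.strIsdigit p | _ => false)
  else if odds_type == "exacta" || odds_type == "quinella" then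
    decide (parts.length = 2) && parts.all PySem.Str.strIsdigit &&
      (match parts with | p0 :: p1 :: _ => p0 != p1 | _ => false)
  else if odds_type == "wide" then
    decide (parts.length = 2) && parts.all PySem.Str.strIsdigit &&
      (match parts with | p0 :: p1 :: _ => p0 != p1 | _ => false)
  else if odds_type == "trio" then
    decide (parts.length = 3) && parts.all PySem.Str.strIsdigit &&
      decide (PySem.Set.len (PySem.Set.ofList parts) = 3)
  else if odds_type == "trifecta" then
    decide (parts.length = 3) && parts.all PySem.Str.strIsdigit &&
      decide (PySem.Set.len (PySem.Set.ofList parts) = 3)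
  else
    false

-- ===== PORT B =====
def pvNeedTable : PySem.Dict String Nat :=
  ⟨[("win", 1), ("place", 1), ("exacta", 2), ("quinella", 2),
    ("wide", 2), ("trio", 3), ("trifecta", 3)]⟩

-- the `for ch in combination + "-":` loop of Source B, with its three early `return False` exits;
-- `cur` (a Python str built by `cur += ch`) is carried as its list of characters
def pvScanB (need : Nat) (distinct : Bool) (seen : List String) (cur : List Char) :
    List Char → Bool
  | [] => decide (seen.length = need)
  | c :: cs =>
    if c = '-' then
      if cur.isEmpty then false
      else if distinct && seen.contains (String.ofList cur) then false
      else pvScanB need distinct (seen ++ [String.ofList cur]) [] cs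
    else if PySem.Chars.isdigit c then pvScanB need distinct seen (cur ++ [c]) cs
    else false

def validate_combination_py_alt (odds_type : String) (combination : String) : Bool :=
  match pvNeedTable.get? odds_type with
  | none => false
  | some need => pvScanB need (decide (1 < need)) [] [] (combination.toList ++ ['-'])

-- ===== PRECONDITION & SPEC =====
def Spec_validate_combination_py (odds_type : String) (combination : String) (out : Bool) : Prop := out = validate_combination_py_alt odds_type combination
instance (odds_type : String) (combination : String) (out : Bool) : Decidable (Spec_validate_combination_py odds_type combination out) := by unfold Spec_validate_combination_py; infer_instance

-- ===== CLAIM (what is proved, stated in full; the proofs are below) =====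
def Claim_equal_validate_combination_py : Prop := ∀ (odds_type : String) (combination : String), Dom_validate_combination_py odds_type combination → Spec_validate_combination_py odds_type combination (validate_combination_py odds_type combination)

-- ===== LEMMAS AND PROOFS =====

-- a pure accumulator form of Python's split("-") on a char list
def pvSplit : List Char → List Char → List (List Char)
  | [], cur => [cur.reverse]
  | c :: t, cur => if c = '-' then cur.reverse :: pvSplit t [] else pvSplit t (c :: cur)

-- part-by-part validation: what pvScanB does to the parts it flushes
def pvProc (need : Nat) (distinct : Bool) (seen : List String) : List (List Char) → Bool
  | [] => decide (seen.length = need)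
  | p :: ps =>
    if PySem.Chars.strIsdigit p then
      if distinct && seen.contains (String.ofList p) then false
      else pvProc need distinct (seen ++ [String.ofList p]) ps
    else false

theorem pv_go_eq (fuel : Nat) : ∀ (l cur : List Char) (acc : List (List Char)), l.length < fuel →
    PySem.Chars.splitOn.go ['-'] fuel l cur acc = acc.reverse ++ pvSplit l cur := by
  induction fuel with
  | zero => intro l cur acc h; omega
  | succ fuel ih =>
    intro l cur acc h
    cases l with
    | nil => simp [PySem.Chars.splitOn.go, pvSplit]
    | cons c rest =>
      by_cases hc : c = '-'
      · subst hc
        have hp : List.isPrefixOf ['-'] ('-' :: rest) = true := by simp [List.isPrefixOf]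
        simp only [PySem.Chars.splitOn.go, hp, if_pos, List.length_cons, List.drop_succ_cons, List.length_nil, List.drop_zero]
        rw [ih rest [] (cur.reverse :: acc) (by simp at h ⊢; omega)]
        simp [pvSplit]
      · have hp : List.isPrefixOf ['-'] (c :: rest) = false := by simp [List.isPrefixOf]; exact fun e => hc e.symm
        simp only [PySem.Chars.splitOn.go, hp, Bool.false_eq_true, if_false]
        rw [ih rest (c :: cur) acc (by simp at h ⊢; omega)]
        simp [pvSplit, hc]

theorem pv_splitOn_eq (cs : List Char) : PySem.Chars.splitOn cs ['-'] = pvSplit cs [] := by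
  have := pv_go_eq (cs.length + 1) cs [] [] (by omega)
  simpa [PySem.Chars.splitOn] using this

theorem pv_split_head (t : List Char) : ∀ cur : List Char,
    ∃ h rest, pvSplit t cur = (cur.reverse ++ h) :: rest := by
  induction t with
  | nil => intro cur; exact ⟨[], [], by simp [pvSplit]⟩
  | cons c t ih =>
    intro cur
    by_cases hc : c = '-'
    · exact ⟨[], pvSplit t [], by simp [pvSplit, hc]⟩
    · obtain ⟨h, rest, hr⟩ := ih (c :: cur)
      exact ⟨c :: h, rest, by simp [pvSplit, hc, hr]⟩

theorem pv_proc_bad (need : Nat) (distinct : Bool) (seen : List String)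
    (t cur : List Char) (c : Char) (hc : c ∈ cur) (hd : PySem.Chars.isdigit c = false) :
    pvProc need distinct seen (pvSplit t cur) = false := by
  obtain ⟨h, rest, hr⟩ := pv_split_head t cur
  have hbad : PySem.Chars.strIsdigit (cur.reverse ++ h) = false := by
    have hall : (cur.reverse ++ h).all PySem.Chars.isdigit = false := by
      rw [List.all_eq_false]
      exact ⟨c, by simp [hc], by simp [hd]⟩
    simp [PySem.Chars.strIsdigit, hall]
  simp [hr, pvProc, hbad]

theorem pv_scan_eq (need : Nat) (distinct : Bool) :
    ∀ (cs : List Char) (seen : List String) (cur : List Char),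
    cur.all PySem.Chars.isdigit = true →
    pvScanB need distinct seen cur (cs ++ ['-']) =
      pvProc need distinct seen (pvSplit cs cur.reverse) := by
  intro cs
  induction cs with
  | nil =>
    intro seen cur hall
    by_cases he : cur.isEmpty
    · have hnil : cur = [] := by simpa [List.isEmpty_iff] using he
      subst hnil
      simp [pvScanB, pvSplit, pvProc, PySem.Chars.strIsdigit]
    · have hdig : PySem.Chars.strIsdigit cur = true := by
        simp [PySem.Chars.strIsdigit, List.isEmpty_iff] at he ⊢
        exact ⟨he, by simpa using hall⟩
      cases hmem : distinct && seen.contains (String.ofList cur) <;>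
        simp [pvScanB, pvSplit, pvProc, he, hdig]
  | cons c t ih =>
    intro seen cur hall
    by_cases hc : c = '-'
    · subst hc
      simp only [List.cons_append, pvScanB, reduceIte]
      by_cases he : cur.isEmpty
      · have hnil : cur = [] := by simpa [List.isEmpty_iff] using he
        subst hnil
        simp [pvSplit, pvProc, PySem.Chars.strIsdigit]
      · have hdig : PySem.Chars.strIsdigit cur = true := by
          simp [PySem.Chars.strIsdigit, List.isEmpty_iff] at he ⊢
          exact ⟨he, by simpa using hall⟩
        rw [ih (seen ++ [String.ofList cur]) [] (by simp)]
        have he' : cur.isEmpty = false := by simpa using he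
        simp only [he', Bool.false_eq_true, if_false, pvSplit,
          List.reverse_reverse, pvProc, hdig, if_pos, List.reverse_nil]
    · by_cases hd : PySem.Chars.isdigit c
      · simp only [List.cons_append, pvScanB, if_neg hc, hd, if_pos]
        rw [ih seen (cur ++ [c]) (by simp [hd]; simpa using hall)]
        simp [pvSplit, hc]
      · simp only [List.cons_append, pvScanB, if_neg hc, hd, Bool.false_eq_true, if_false]
        rw [show pvSplit (c :: t) cur.reverse = pvSplit t (c :: cur.reverse) from by
          simp [pvSplit, hc]]
        rw [pv_proc_bad need distinct seen t (c :: cur.reverse) c (by simp) (by simpa using hd)]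

theorem pv_proc_closed (need : Nat) (distinct : Bool) :
    ∀ (ps : List (List Char)) (seen : List String),
    (distinct = true → seen.Nodup) →
    pvProc need distinct seen ps =
      (ps.all PySem.Chars.strIsdigit && decide (seen.length + ps.length = need) &&
       (!distinct || decide (seen ++ ps.map String.ofList).Nodup)) := by
  intro ps
  induction ps with
  | nil =>
    intro seen hnd
    cases distinct with
    | false => simp [pvProc]
    | true => simp [pvProc, hnd rfl]
  | cons p ps ih =>
    intro seen hnd
    by_cases hp : PySem.Chars.strIsdigit p
    · by_cases hmem : distinct && seen.contains (String.ofList p)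
      · rw [Bool.and_eq_true] at hmem
        obtain ⟨h1, h2⟩ := hmem
        subst h1
        have hin : String.ofList p ∈ seen := by simpa using h2
        have hnn : ¬ (seen ++ (p :: ps).map String.ofList).Nodup := by
          intro hnodup
          exact List.disjoint_of_nodup_append hnodup hin (by simp)
        have hnn' : decide (seen ++ (p :: ps).map String.ofList).Nodup = false := by simpa using hnn
        simp [pvProc, hp, hin]
        simp at hnn'
        simp [hnn']
      · have hmem' : distinct = true → String.ofList p ∉ seen := by
          intro h1; subst h1; simpa using hmem
        rw [pvProc]
        simp only [hp, if_pos, hmem, Bool.false_eq_true, if_false]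
        rw [ih (seen ++ [String.ofList p]) (by
          intro h1
          exact (hnd h1).append (by simp) (by simpa using hmem' h1))]
        have hassoc : seen ++ [String.ofList p] ++ List.map String.ofList ps
            = seen ++ List.map String.ofList (p :: ps) := by simp
        have hlen : (seen.length + 1 + ps.length = need)
            ↔ (seen.length + (ps.length + 1) = need) := by omega
        rw [hassoc]
        simp [hp, hlen]
        rfl
    · simp [pvProc, hp]

-- B's scan in closed form: all parts digit strings, right count, and (if required) no duplicates
theorem pv_alt_closed (need : Nat) (distinct : Bool) (cs : List Char) :
    pvScanB need distinct [] [] (cs ++ ['-']) =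
      ((pvSplit cs []).all PySem.Chars.strIsdigit && decide ((pvSplit cs []).length = need) &&
       (!distinct || decide ((pvSplit cs []).map String.ofList).Nodup)) := by
  rw [pv_scan_eq need distinct cs [] [] (by simp)]
  simp only [List.reverse_nil]
  rw [pv_proc_closed need distinct (pvSplit cs []) [] (by intro _; exact List.nodup_nil)]
  simp
  rfl

theorem pv_parts_eq (combination : String) :
    (PySem.Str.split? combination "-").getD []
      = (pvSplit combination.toList []).map String.ofList := by
  rw [← pv_splitOn_eq]
  simp [PySem.Str.split?, PySem.Chars.split?]

-- n = 1 branch of A vs the closed form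
theorem pv_one (l : List (List Char)) :
    (decide ((l.map String.ofList).length = 1) &&
      (match l.map String.ofList with | [p] => PySem.Str.strIsdigit p | _ => false)) =
    (l.all PySem.Chars.strIsdigit && decide (l.length = 1)) := by
  rcases l with _ | ⟨a, _ | ⟨b, t⟩⟩ <;> simp [PySem.Str.strIsdigit_eq]

-- n = 2 branch of A vs the closed form
theorem pv_two (l : List (List Char)) :
    (decide ((l.map String.ofList).length = 2) &&
      (l.map String.ofList).all PySem.Str.strIsdigit &&
      (match l.map String.ofList with | p0 :: p1 :: _ => p0 != p1 | _ => false)) =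
    (l.all PySem.Chars.strIsdigit && decide (l.length = 2) &&
      decide ((l.map String.ofList).Nodup)) := by
  rcases l with _ | ⟨a, _ | ⟨b, _ | ⟨c, t⟩⟩⟩
  · simp
  · simp
  · by_cases hab : String.ofList a = String.ofList b <;>
      simp [PySem.Str.strIsdigit_eq, Bool.and_comm, hab]
  · simp

-- n = 3 branch of A vs the closed form (len(set(·)) == 3 on a 3-list is Nodup)
theorem pv_three (l : List (List Char)) :
    (decide ((l.map String.ofList).length = 3) &&
      (l.map String.ofList).all PySem.Str.strIsdigit &&
      decide (PySem.Set.len (PySem.Set.ofList (l.map String.ofList)) = 3)) =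
    (l.all PySem.Chars.strIsdigit && decide (l.length = 3) &&
      decide ((l.map String.ofList).Nodup)) := by
  rcases l with _ | ⟨a, _ | ⟨b, _ | ⟨c, _ | ⟨d, t⟩⟩⟩⟩
  · simp
  · simp
  · simp
  · by_cases hab : String.ofList a = String.ofList b
    · by_cases hac : String.ofList a = String.ofList c
      · have hcb : String.ofList c = String.ofList b := hac.symm.trans hab
        simp [PySem.Set.ofList, PySem.Set.add, PySem.Set.contains, PySem.Set.empty,
          PySem.Set.len, hab, hcb, PySem.Str.strIsdigit_eq]
      · have hcb : String.ofList c ≠ String.ofList b := fun h => hac (hab.trans h.symm)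
        simp [PySem.Set.ofList, PySem.Set.add, PySem.Set.contains, PySem.Set.empty,
          PySem.Set.len, hab, hcb, PySem.Str.strIsdigit_eq]
    · by_cases hac : String.ofList a = String.ofList c
      · have hcb : String.ofList c ≠ String.ofList b := fun h => hab (hac.trans h)
        simp [PySem.Set.ofList, PySem.Set.add, PySem.Set.contains, PySem.Set.empty,
          PySem.Set.len, hac, hcb, Ne.symm hcb, PySem.Str.strIsdigit_eq,
          Bool.and_comm, Bool.and_left_comm]
      · by_cases hbc : String.ofList b = String.ofList c
        · simp [PySem.Set.ofList, PySem.Set.add, PySem.Set.contains, PySem.Set.empty,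
            PySem.Set.len, hac, Ne.symm hac, hbc, PySem.Str.strIsdigit_eq,
            Bool.and_comm]
        · simp [PySem.Set.ofList, PySem.Set.add, PySem.Set.contains, PySem.Set.empty,
            PySem.Set.len, hab, Ne.symm hab, hac, Ne.symm hac, hbc, Ne.symm hbc,
            PySem.Str.strIsdigit_eq, Bool.and_comm]
  · simp

-- ===== VERDICT (by name: the statement is the Claim_ definition above) =====
theorem validate_combination_py_spec : Claim_equal_validate_combination_py := by
  intro odds_type combination _
  unfold Spec_validate_combination_py validate_combination_py validate_combination_py_alt
  rw [pv_parts_eq]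
  by_cases h1 : odds_type = "win"
  · subst h1
    simp only [pvNeedTable, PySem.Dict.get?, List.find?, String.reduceBEq, beq_self_eq_true, Option.map_some]
    rw [pv_alt_closed, pv_one]
    simp
  by_cases h2 : odds_type = "place"
  · subst h2
    simp only [pvNeedTable, PySem.Dict.get?, List.find?, String.reduceBEq, beq_self_eq_true, Option.map_some]
    rw [pv_alt_closed, pv_one]
    simp
  by_cases h3 : odds_type = "exacta"
  · subst h3
    simp only [pvNeedTable, PySem.Dict.get?, List.find?, String.reduceBEq, beq_self_eq_true, Option.map_some]
    rw [pv_alt_closed, pv_two]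
    simp
  by_cases h4 : odds_type = "quinella"
  · subst h4
    simp only [pvNeedTable, PySem.Dict.get?, List.find?, String.reduceBEq, beq_self_eq_true, Option.map_some]
    rw [pv_alt_closed, pv_two]
    simp
  by_cases h5 : odds_type = "wide"
  · subst h5
    simp only [pvNeedTable, PySem.Dict.get?, List.find?, String.reduceBEq, beq_self_eq_true, Option.map_some]
    rw [pv_alt_closed, pv_two]
    simp
  by_cases h6 : odds_type = "trio"
  · subst h6
    simp only [pvNeedTable, PySem.Dict.get?, List.find?, String.reduceBEq, beq_self_eq_true, Option.map_some]
    rw [pv_alt_closed, pv_three]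
    simp
  by_cases h7 : odds_type = "trifecta"
  · subst h7
    simp only [pvNeedTable, PySem.Dict.get?, List.find?, String.reduceBEq, beq_self_eq_true, Option.map_some]
    rw [pv_alt_closed, pv_three]
    simp
  have e1 : ("win" == odds_type) = false := by simp [Ne.symm h1]
  have e2 : ("place" == odds_type) = false := by simp [Ne.symm h2]
  have e3 : ("exacta" == odds_type) = false := by simp [Ne.symm h3]
  have e4 : ("quinella" == odds_type) = false := by simp [Ne.symm h4]
  have e5 : ("wide" == odds_type) = false := by simp [Ne.symm h5]
  have e6 : ("trio" == odds_type) = false := by simp [Ne.symm h6]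
  have e7 : ("trifecta" == odds_type) = false := by simp [Ne.symm h7]
  simp [pvNeedTable, PySem.Dict.get?, List.find?, e1, e2, e3, e4, e5, e6, e7,
    h1, h2, h3, h4, h5, h6, h7]
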